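-- pv_equiv track=rewrite | github.com/maggienardini/strands-thesis | strands/src/data/grid.py | _path_spans_opposite_edges
-- ===== SOURCE A (Python) =====
-- ROWS = 6
--
-- COLS = 8
--
-- def _edge_id(cell):
--     r, c = cell
--     edges = set()
--     if r == 0:
--         edges.add("top")
--     if r == ROWS - 1:
--         edges.add("bottom")
--     if c == 0:
--         edges.add("left")
--     if c == COLS - 1:
--         edges.add("right")
--     return edges
--
-- def _path_spans_opposite_edges(path):
--     touched_edges = set()
--     for cell in path:
--         touched_edges.update(_edge_id(cell))
--     return (
--         ("left" in touched_edges and "right" in touched_edges)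
--         or ("top" in touched_edges and "bottom" in touched_edges)
--     )
-- ===== SOURCE B (Python) =====
-- ROWS = 6
--
-- COLS = 8
--
-- def _path_spans_opposite_edges(path):
--     cells = tuple(path)
--     return (
--         (any(c == 0 for _, c in cells) and any(c == COLS - 1 for _, c in cells))
--         or (any(r == 0 for r, _ in cells) and any(r == ROWS - 1 for r, _ in cells))
--     )
-- ===== Notes on version B (the rewrite author's own statement) =====
-- stated objective: simpler
-- what changed: Drops the _edge_id helper and the accumulated label set; B materializes the path once and answers with four independent boolean existence scans over the coordinates.
import Mathlib
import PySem

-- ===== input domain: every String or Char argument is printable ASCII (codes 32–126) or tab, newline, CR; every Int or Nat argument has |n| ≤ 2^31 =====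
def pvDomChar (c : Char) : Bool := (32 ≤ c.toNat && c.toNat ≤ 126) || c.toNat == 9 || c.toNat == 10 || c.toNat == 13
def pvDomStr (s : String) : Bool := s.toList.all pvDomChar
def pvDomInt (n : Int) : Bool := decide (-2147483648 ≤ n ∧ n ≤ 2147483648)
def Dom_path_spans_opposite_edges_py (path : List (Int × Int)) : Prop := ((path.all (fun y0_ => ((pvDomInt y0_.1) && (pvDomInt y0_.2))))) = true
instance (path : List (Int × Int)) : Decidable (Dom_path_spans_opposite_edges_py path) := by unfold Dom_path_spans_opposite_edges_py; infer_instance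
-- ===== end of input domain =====

-- B replaces the edge-label set accumulation with four independent coordinate existence scans (objective: simpler).


-- ===== PORT A =====
def edge_id_py (cell : Int × Int) : PySem.Set String :=
  let r := cell.1
  let c := cell.2
  let edges : PySem.Set String := PySem.Set.empty
  let edges := if r = 0 then edges.add "top" else edges
  let edges := if r = 6 - 1 then edges.add "bottom" else edges
  let edges := if c = 0 then edges.add "left" else edges
  let edges := if c = 8 - 1 then edges.add "right" else edges
  edges

def path_spans_opposite_edges_py (path : List (Int × Int)) : Bool :=
  let touched := path.foldl (fun acc cell => PySem.Set.update acc (edge_id_py cell)) PySem.Set.empty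
  (touched.contains "left" && touched.contains "right")
    || (touched.contains "top" && touched.contains "bottom")

-- ===== PORT B =====
def path_spans_opposite_edges_py_alt (path : List (Int × Int)) : Bool :=
  let cells := path
  (cells.any (fun p => p.2 == 0) && cells.any (fun p => p.2 == 8 - 1))
    || (cells.any (fun p => p.1 == 0) && cells.any (fun p => p.1 == 6 - 1))

-- ===== PRECONDITION & SPEC =====
def Spec_path_spans_opposite_edges_py (path : List (Int × Int)) (out : Bool) : Prop := out = path_spans_opposite_edges_py_alt path
instance (path : List (Int × Int)) (out : Bool) : Decidable (Spec_path_spans_opposite_edges_py path out) := by unfold Spec_path_spans_opposite_edges_py; infer_instance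

-- ===== CLAIM (what is proved, stated in full; the proofs are below) =====
def Claim_equal_path_spans_opposite_edges_py : Prop := ∀ (path : List (Int × Int)), Dom_path_spans_opposite_edges_py path → Spec_path_spans_opposite_edges_py path (path_spans_opposite_edges_py path)

-- ===== LEMMAS AND PROOFS =====

theorem mem_update_iff {α : Type} [BEq α] [LawfulBEq α] (x : α) (l : List α) :
    ∀ (s : PySem.Set α), x ∈ PySem.Set.update s l ↔ x ∈ s ∨ x ∈ l := by
  induction l with
  | nil => intro s; simp [PySem.Set.update]
  | cons a t ih =>
      intro s
      show x ∈ PySem.Set.update (PySem.Set.add s a) t ↔ _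
      rw [ih]
      simp [PySem.Set.mem_add, or_assoc]

theorem mem_edge_id (x : String) (cell : Int × Int) :
    x ∈ edge_id_py cell ↔
      (x = "top" ∧ cell.1 = 0) ∨ (x = "bottom" ∧ cell.1 = 5) ∨
      (x = "left" ∧ cell.2 = 0) ∨ (x = "right" ∧ cell.2 = 7) := by
  simp only [edge_id_py]
  split_ifs <;> simp_all [PySem.Set.empty]

theorem mem_fold_iff (x : String) (P : Int × Int → Prop) [DecidablePred P]
    (hP : ∀ cell, x ∈ edge_id_py cell ↔ P cell) :
    ∀ (path : List (Int × Int)) (acc : PySem.Set String),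
      (x ∈ path.foldl (fun acc cell => PySem.Set.update acc (edge_id_py cell)) acc
        ↔ x ∈ acc ∨ ∃ p ∈ path, P p) := by
  intro path
  induction path with
  | nil => intro acc; simp
  | cons a t ih =>
      intro acc
      simp only [List.foldl_cons]
      rw [ih, mem_update_iff, hP]
      simp [or_assoc]

theorem contains_fold (x : String) (P : Int × Int → Prop) [DecidablePred P]
    (hP : ∀ cell, x ∈ edge_id_py cell ↔ P cell) (path : List (Int × Int)) :
    (path.foldl (fun acc cell => PySem.Set.update acc (edge_id_py cell))
        PySem.Set.empty).contains x = path.any (fun p => decide (P p)) := by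
  rw [Bool.eq_iff_iff, PySem.Set.contains_iff, mem_fold_iff x P hP]
  simp [PySem.Set.empty, List.any_eq_true]

-- ===== VERDICT (by name: the statement is the Claim_ definition above) =====
theorem path_spans_opposite_edges_py_spec : Claim_equal_path_spans_opposite_edges_py := by
  intro path _
  unfold Spec_path_spans_opposite_edges_py path_spans_opposite_edges_py path_spans_opposite_edges_py_alt
  simp only []
  rw [contains_fold "left" (fun p => p.2 = 0) (by intro c; rw [mem_edge_id]; simp),
      contains_fold "right" (fun p => p.2 = 7) (by intro c; rw [mem_edge_id]; simp),
      contains_fold "top" (fun p => p.1 = 0) (by intro c; rw [mem_edge_id]; simp),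
      contains_fold "bottom" (fun p => p.1 = 5) (by intro c; rw [mem_edge_id]; simp)]
  rw [Bool.eq_iff_iff]
  simp [List.any_eq_true, Bool.or_comm]
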